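-- pv_equiv track=rewrite | github.com/JC-Cheng/Algorithms | Multiset/multiset.py | multiset_subset
-- ===== SOURCE A (Python) =====
-- import collections
-- import functools
-- import itertools
--
-- def multiset_subset(multiset):
--
--     cnt = collections.Counter(multiset.split(','))
--
--     def mapper(L):
--         return ','.join(functools.reduce(lambda a, b: a + b, [[k] * v for k, v in zip(cnt.keys(), L)]))
--
--     res = []
--
--     for comb in itertools.product(*[list(range(v + 1)) for v in cnt.values()]):
--         if sum(comb) > 0: res.append(mapper(comb))
--
--     return res
-- ===== SOURCE B (Python) =====
-- def multiset_subset(multiset):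
--     cnt = {}
--     for tok in multiset.split(','):
--         cnt[tok] = cnt.get(tok, 0) + 1
--     items = list(cnt.items())
--     total = 1
--     for _, v in items:
--         total *= v + 1
--     out = []
--     for idx in range(1, total):
--         toks = []
--         x = idx
--         for k, v in reversed(items):
--             x, j = divmod(x, v + 1)
--             toks = [k] * j + toks
--         out.append(','.join(toks))
--     return out
-- ===== Notes on version B (the rewrite author's own statement) =====
-- stated objective: alternative
-- what changed: Replaces itertools.product over per-key count ranges plus a zip/reduce mapper and a sum>0 filter by mixed-radix unranking: a single integer index runs over range(1, total) and each index is decoded into token counts by repeated divmod over the reversed counter items.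
import Mathlib
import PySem

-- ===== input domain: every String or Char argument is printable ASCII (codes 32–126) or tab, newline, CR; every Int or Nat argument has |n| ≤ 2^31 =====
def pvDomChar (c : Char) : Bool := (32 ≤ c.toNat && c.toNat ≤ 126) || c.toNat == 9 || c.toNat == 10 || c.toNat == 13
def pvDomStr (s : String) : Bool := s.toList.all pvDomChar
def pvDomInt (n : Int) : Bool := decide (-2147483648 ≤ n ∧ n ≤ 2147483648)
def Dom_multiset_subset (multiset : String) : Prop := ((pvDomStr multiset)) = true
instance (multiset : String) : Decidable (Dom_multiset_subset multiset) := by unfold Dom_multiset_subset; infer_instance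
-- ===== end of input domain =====

-- B replaces A's itertools.product enumeration (+ per-combination zip/reduce mapper and sum>0 filter)
-- by mixed-radix unranking: it iterates one integer index over range(1, total) and decodes each index
-- into token counts by repeated divmod (alternative decomposition, same asymptotic cost).

-- ===== PORT A =====

-- itertools.product(*pools) in pool order (last pool varies fastest)
def pyProduct : List (List Int) → List (List Int)
  | [] => [[]]
  | xs :: rest => xs.flatMap (fun x => (pyProduct rest).map (fun c => x :: c))

-- functools.reduce(lambda a, b: a + b, parts); in A parts is never empty
-- (Counter of str.split(',') always has at least one key), so the [] case is unreachable
def reduceConcat : List (List String) → List String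
  | [] => []
  | h :: t => t.foldl (fun a b => a ++ b) h

def multiset_subset (multiset : String) : List String :=
  let cnt := PySem.Dict.counter ((PySem.Str.split? multiset ",").getD [])
  let mapper := fun (L : List Int) =>
    PySem.Str.join "," (reduceConcat ((cnt.keys.zip L).map (fun kv => List.replicate kv.2.toNat kv.1)))
  (pyProduct (cnt.values.map (fun v => PySem.List.pyRange 0 (v + 1) 1))).foldl
    (fun res comb => if 0 < comb.sum then res ++ [mapper comb] else res) []

-- ===== PORT B =====

def multiset_subset_alt (multiset : String) : List String :=
  let cnt := ((PySem.Str.split? multiset ",").getD []).foldl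
    (fun d t => d.insert t (d.getD t 0 + 1)) PySem.Dict.empty
  let items := cnt.items
  let total := items.foldl (fun t kv => t * (kv.2 + 1)) 1
  (PySem.List.pyRange 1 total 1).map (fun idx =>
    PySem.Str.join "," ((items.reverse.foldl
      (fun (st : Int × List String) kv =>
        (PySem.Int.floordiv st.1 (kv.2 + 1),
         List.replicate (PySem.Int.mod st.1 (kv.2 + 1)).toNat kv.1 ++ st.2))
      (idx, ([] : List String))).2))

-- ===== PRECONDITION & SPEC =====
def Spec_multiset_subset (multiset : String) (out : List String) : Prop := out = multiset_subset_alt multiset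
instance (multiset : String) (out : List String) : Decidable (Spec_multiset_subset multiset out) := by unfold Spec_multiset_subset; infer_instance

-- ===== CLAIM (what is proved, stated in full; the proofs are below) =====
def Claim_equal_multiset_subset : Prop := ∀ (multiset : String), Dom_multiset_subset multiset → Spec_multiset_subset multiset (multiset_subset multiset)

-- ===== LEMMAS AND PROOFS =====

-- token lists of all sub-multisets of `items`, in A's product order
def prodTokens : List (String × Int) → List (List String)
  | [] => [[]]
  | (k, v) :: rest =>
    (PySem.List.pyRange 0 (v + 1) 1).flatMap
      (fun j => (prodTokens rest).map (fun c => List.replicate j.toNat k ++ c))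

-- number of sub-multisets = product of (count + 1)
def Tprod : List (String × Int) → Int
  | [] => 1
  | (_, v) :: rest => (v + 1) * Tprod rest

-- recursive form of B's divmod decoding: digit of each key is (idx / Tprod rest) % (v + 1)
def decR : List (String × Int) → Int → List String
  | [], _ => []
  | (k, v) :: rest, idx =>
      List.replicate (PySem.Int.mod (PySem.Int.floordiv idx (Tprod rest)) (v + 1)).toNat k
        ++ decR rest idx

theorem reduceConcat_eq_flatten (l : List (List String)) : reduceConcat l = l.flatten := by
  cases l with
  | nil => rfl
  | cons h t => simp [reduceConcat, PySem.List.foldl_append_eq_flatten]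

-- A's mapper applied along the product equals prodTokens
theorem map_tok_pyProduct (items : List (String × Int)) :
    (pyProduct (items.map (fun p => PySem.List.pyRange 0 (p.2 + 1) 1))).map
      (fun comb => (((items.map (·.1)).zip comb).map
        (fun kv => List.replicate kv.2.toNat kv.1)).flatten)
      = prodTokens items := by
  induction items with
  | nil => simp [pyProduct, prodTokens]
  | cons p rest ih =>
    obtain ⟨k, v⟩ := p
    simp only [List.map_cons, pyProduct, prodTokens, List.map_flatMap, List.map_map]
    refine List.flatMap_congr (fun x _ => ?_)
    rw [← ih, List.map_map]
    refine List.map_congr_left (fun c _ => ?_)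
    simp [List.zip_cons_cons]

theorem sum_nonneg_pyProduct (items : List (String × Int))
    (h : ∀ p ∈ items, 0 ≤ p.2)
    (c : List Int)
    (hc : c ∈ pyProduct (items.map (fun p => PySem.List.pyRange 0 (p.2 + 1) 1))) :
    0 ≤ c.sum := by
  induction items generalizing c with
  | nil => simp [pyProduct] at hc; simp [hc]
  | cons p rest ih =>
    simp only [List.map_cons, pyProduct, List.mem_flatMap, List.mem_map] at hc
    obtain ⟨x, hx, c', hc', rfl⟩ := hc
    have hx0 : 0 ≤ x := (PySem.List.mem_pyRange_one.mp hx).1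
    have := ih (fun q hq => h q (List.mem_cons_of_mem _ hq)) c' hc'
    simp only [List.sum_cons]; omega

theorem pyProduct_zero_head (items : List (String × Int))
    (h : ∀ p ∈ items, 0 ≤ p.2) :
    ∃ rest, pyProduct (items.map (fun p => PySem.List.pyRange 0 (p.2 + 1) 1))
        = (items.map (fun _ => (0 : Int))) :: rest
      ∧ ∀ c ∈ rest, 0 < c.sum := by
  induction items with
  | nil => exact ⟨[], rfl, by simp⟩
  | cons p t ih =>
    obtain ⟨k, v⟩ := p
    have hv : (0 : Int) ≤ v := h (k, v) (List.mem_cons_self)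
    obtain ⟨rest, hP, hrest⟩ := ih (fun q hq => h q (List.mem_cons_of_mem _ hq))
    have hr : PySem.List.pyRange 0 (v + 1) 1 = 0 :: PySem.List.pyRange 1 (v + 1) 1 :=
      PySem.List.pyRange_one_cons (by omega)
    refine ⟨(rest.map (fun c => (0 : Int) :: c)) ++
      (PySem.List.pyRange 1 (v + 1) 1).flatMap
        (fun x => (pyProduct (t.map (fun p => PySem.List.pyRange 0 (p.2 + 1) 1))).map
          (fun c => x :: c)), ?_, ?_⟩
    · simp only [List.map_cons, pyProduct, hr, List.flatMap_cons, hP, List.map_cons,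
        List.cons_append]
    · intro c hc
      rcases List.mem_append.mp hc with hc | hc
      · obtain ⟨c', hc', rfl⟩ := List.mem_map.mp hc
        have := hrest c' hc'
        simp only [List.sum_cons]; omega
      · obtain ⟨x, hx, hc2⟩ := List.mem_flatMap.mp hc
        obtain ⟨c', hc', rfl⟩ := List.mem_map.mp hc2
        have hx1 : (1 : Int) ≤ x := (PySem.List.mem_pyRange_one.mp hx).1
        have := sum_nonneg_pyProduct t (fun q hq => h q (List.mem_cons_of_mem _ hq)) c' hc'
        simp only [List.sum_cons]; omega

-- the sum>0 filter keeps exactly everything after the all-zeros head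
theorem filter_pyProduct_eq_drop (items : List (String × Int))
    (h : ∀ p ∈ items, 0 ≤ p.2) :
    (pyProduct (items.map (fun p => PySem.List.pyRange 0 (p.2 + 1) 1))).filter
        (fun c => decide (0 < c.sum))
      = (pyProduct (items.map (fun p => PySem.List.pyRange 0 (p.2 + 1) 1))).drop 1 := by
  obtain ⟨rest, hP, hrest⟩ := pyProduct_zero_head items h
  rw [hP]
  simp only [List.filter_cons, List.drop_succ_cons, List.drop_zero]
  have h0 : ((items.map (fun _ => (0 : Int))).sum) = 0 := by
    simp [List.sum_eq_zero]
  rw [if_neg (by simp)]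
  exact List.filter_eq_self.mpr (fun c hc => by simpa using hrest c hc)

theorem Tprod_pos (items : List (String × Int)) (h : ∀ p ∈ items, 0 ≤ p.2) :
    0 < Tprod items := by
  induction items with
  | nil => simp [Tprod]
  | cons p rest ih =>
    obtain ⟨k, v⟩ := p
    have hv : (0 : Int) ≤ v := h (k, v) (List.mem_cons_self)
    have := ih (fun q hq => h q (List.mem_cons_of_mem _ hq))
    simp only [Tprod]
    positivity

-- B's running-product loop computes Tprod
theorem foldl_total_eq_Tprod (items : List (String × Int)) (t0 : Int) :
    items.foldl (fun t kv => t * (kv.2 + 1)) t0 = t0 * Tprod items := by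
  induction items generalizing t0 with
  | nil => simp [Tprod]
  | cons p rest ih =>
    obtain ⟨k, v⟩ := p
    simp only [List.foldl_cons, Tprod, ih]
    ring

-- B's reversed divmod loop computes decR (and leaves idx / Tprod in the quotient slot)
theorem foldl_decode (items : List (String × Int)) (h : ∀ p ∈ items, 0 ≤ p.2)
    (idx : Int) (acc : List String) :
    items.reverse.foldl
      (fun (st : Int × List String) kv =>
        (PySem.Int.floordiv st.1 (kv.2 + 1),
         List.replicate (PySem.Int.mod st.1 (kv.2 + 1)).toNat kv.1 ++ st.2))
      (idx, acc)
      = (PySem.Int.floordiv idx (Tprod items), decR items idx ++ acc) := by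
  induction items generalizing acc with
  | nil =>
    simp only [List.reverse_nil, List.foldl_nil, Tprod, decR, List.nil_append]
    rw [PySem.Int.floordiv_eq_ediv_of_pos (by omega)]
    simp
  | cons p rest ih =>
    obtain ⟨k, v⟩ := p
    have hv : (0 : Int) ≤ v := h (k, v) (List.mem_cons_self)
    have hr : ∀ q ∈ rest, 0 ≤ q.2 := fun q hq => h q (List.mem_cons_of_mem _ hq)
    have hTr : 0 < Tprod rest := Tprod_pos rest hr
    rw [List.reverse_cons, List.foldl_append, ih hr]
    simp only [List.foldl_cons, List.foldl_nil, decR, Tprod, List.append_assoc]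
    congr 1
    rw [PySem.Int.floordiv_eq_ediv_of_pos (by omega),
        PySem.Int.floordiv_eq_ediv_of_pos hTr,
        PySem.Int.floordiv_eq_ediv_of_pos (by positivity)]
    rw [Int.ediv_ediv_of_nonneg (le_of_lt hTr)]
    ring_nf

-- unchanged low digits: adding a multiple of Tprod does not change the decoding
theorem decR_add_mul (items : List (String × Int)) (h : ∀ p ∈ items, 0 ≤ p.2)
    (q y : Int) :
    decR items (q * Tprod items + y) = decR items y := by
  induction items generalizing q with
  | nil => simp [decR]
  | cons p rest ih =>
    obtain ⟨k, v⟩ := p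
    have hv : (0 : Int) ≤ v := h (k, v) (List.mem_cons_self)
    have hr : ∀ x ∈ rest, 0 ≤ x.2 := fun x hx => h x (List.mem_cons_of_mem _ hx)
    have hTr : 0 < Tprod rest := Tprod_pos rest hr
    have hrw : q * Tprod ((k, v) :: rest) + y = (q * (v + 1)) * Tprod rest + y := by
      simp only [Tprod]; ring
    simp only [decR, hrw]
    rw [ih hr]
    congr 2
    rw [PySem.Int.floordiv_eq_ediv_of_pos hTr, PySem.Int.floordiv_eq_ediv_of_pos hTr,
        add_comm (q * (v + 1) * Tprod rest) y,
        Int.add_mul_ediv_right _ _ (by omega : Tprod rest ≠ 0)]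
    rw [PySem.Int.mod_eq_emod_of_pos (by omega), PySem.Int.mod_eq_emod_of_pos (by omega)]
    rw [show y / Tprod rest + q * (v + 1) = y / Tprod rest + (v + 1) * q by ring,
        Int.add_mul_emod_self_left]

-- range(0, r*T) splits into blocks [j*T, (j+1)*T) — range decomposition for unranking
theorem pyRange_mul_decompose (r T : Int) (hr : 0 ≤ r) (hT : 0 < T) :
    PySem.List.pyRange 0 (r * T) 1
      = (PySem.List.pyRange 0 r 1).flatMap
          (fun j => (PySem.List.pyRange 0 T 1).map (fun y => j * T + y)) := by
  obtain ⟨n, rfl⟩ := Int.eq_ofNat_of_zero_le hr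
  induction n with
  | zero => simp [PySem.List.pyRange_one_eq_nil]
  | succ m ih =>
    have hm : ((m : Int)) ≤ ((m : Int)) + 1 := by omega
    have h1 : ((m + 1 : Nat) : Int) = (m : Int) + 1 := by push_cast; ring
    rw [h1, PySem.List.pyRange_one_succ_right (by omega : (0:Int) ≤ (m:Int)),
        List.flatMap_append]
    rw [add_mul, one_mul,
        PySem.List.pyRange_one_append 0 ((m:Int) * T) ((m:Int)*T + T)
          (by positivity) (by omega), ← ih (Int.natCast_nonneg m)]
    congr 1
    simp only [List.flatMap_cons, List.flatMap_nil, List.append_nil]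
    rw [PySem.List.pyRange_one 0 T, PySem.List.pyRange_one ((m:Int)*T) ((m:Int)*T + T)]
    simp only [add_sub_cancel_left, sub_zero, List.map_map]
    exact List.map_congr_left (fun k _ => by simp [Function.comp])

-- unranking range(0, Tprod) with decR enumerates prodTokens in A's order
theorem map_decR_pyRange (items : List (String × Int)) (h : ∀ p ∈ items, 0 ≤ p.2) :
    (PySem.List.pyRange 0 (Tprod items) 1).map (decR items) = prodTokens items := by
  induction items with
  | nil =>
    simp [Tprod, decR, prodTokens]
  | cons p rest ih =>
    obtain ⟨k, v⟩ := p
    have hv : (0 : Int) ≤ v := h (k, v) (List.mem_cons_self)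
    have hr : ∀ q ∈ rest, 0 ≤ q.2 := fun q hq => h q (List.mem_cons_of_mem _ hq)
    have hTr : 0 < Tprod rest := Tprod_pos rest hr
    have hdec : Tprod ((k, v) :: rest) = (v + 1) * Tprod rest := rfl
    rw [hdec, pyRange_mul_decompose (v + 1) (Tprod rest) (by omega) hTr,
        List.map_flatMap]
    simp only [prodTokens]
    refine List.flatMap_congr (fun j hj => ?_)
    obtain ⟨hj0, hjv⟩ := PySem.List.mem_pyRange_one.mp hj
    rw [List.map_map, ← ih hr, List.map_map]
    refine List.map_congr_left (fun y hy => ?_)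
    obtain ⟨hy0, hyT⟩ := PySem.List.mem_pyRange_one.mp hy
    simp only [Function.comp, decR]
    have hq : PySem.Int.floordiv (j * Tprod rest + y) (Tprod rest) = j := by
      rw [PySem.Int.floordiv_eq_ediv_of_pos hTr, add_comm (j * Tprod rest) y,
          Int.add_mul_ediv_right _ _ (by omega : Tprod rest ≠ 0),
          Int.ediv_eq_zero_of_lt hy0 hyT, zero_add]
    have hm : PySem.Int.mod j (v + 1) = j := by
      rw [PySem.Int.mod_eq_emod_of_pos (by omega), Int.emod_eq_of_lt hj0 hjv]
    rw [hq, hm, decR_add_mul rest hr j y]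

-- ===== VERDICT (by name: the statement is the Claim_ definition above) =====
set_option maxHeartbeats 1000000 in
theorem multiset_subset_spec : Claim_equal_multiset_subset := by
  intro multiset _
  unfold Spec_multiset_subset multiset_subset multiset_subset_alt
  rw [PySem.Dict.foldl_insert_getD_add_one_eq_counter]
  set xs := (PySem.Str.split? multiset ",").getD []
  set items := (PySem.Dict.counter xs).items with hitems
  have hkeys : (PySem.Dict.counter xs).keys = items.map (·.1) := rfl
  have hvals : (PySem.Dict.counter xs).values = items.map (·.2) := rfl
  have hnn : ∀ p ∈ items, 0 ≤ p.2 := by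
    intro p hp
    rw [hitems, PySem.Dict.items_counter] at hp
    obtain ⟨k, _, rfl⟩ := List.mem_map.mp hp
    exact Int.natCast_nonneg _
  have hT : 0 < Tprod items := Tprod_pos items hnn
  dsimp only
  rw [hkeys, hvals, ← hitems]
  -- A side
  rw [PySem.List.foldl_append_ite]
  have hfuse : (items.map (·.2)).map (fun v => PySem.List.pyRange 0 (v + 1) 1)
      = items.map (fun p => PySem.List.pyRange 0 (p.2 + 1) 1) := by
    rw [List.map_map]; rfl
  rw [hfuse, filter_pyProduct_eq_drop items hnn]
  simp only [List.nil_append]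
  rw [List.map_drop]
  -- B side
  rw [foldl_total_eq_Tprod items 1, one_mul]
  have hrange : PySem.List.pyRange 0 (Tprod items) 1
      = 0 :: PySem.List.pyRange 1 (Tprod items) 1 :=
    PySem.List.pyRange_one_cons hT
  have hBside : (PySem.List.pyRange 1 (Tprod items) 1).map
      (fun idx => PySem.Str.join "," ((items.reverse.foldl
        (fun (st : Int × List String) kv =>
          (PySem.Int.floordiv st.1 (kv.2 + 1),
           List.replicate (PySem.Int.mod st.1 (kv.2 + 1)).toNat kv.1 ++ st.2))
        (idx, ([] : List String))).2))
      = ((prodTokens items).map (fun r => PySem.Str.join "," r)).drop 1 := by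
    rw [← map_decR_pyRange items hnn, List.map_map, hrange]
    simp only [List.map_cons, List.drop_succ_cons, List.drop_zero]
    refine List.map_congr_left (fun idx _ => ?_)
    simp [Function.comp, foldl_decode items hnn idx []]
  rw [hBside, ← map_tok_pyProduct items, List.map_map]
  congr 1
  exact List.map_congr_left (fun c _ => by
    simp [Function.comp, reduceConcat_eq_flatten])
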